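-- pv_equiv track=rewrite | github.com/purplesmoke05/dotnix | home-manager/gui/editor/zed/keymap_from_vscode.py | ordered_contexts
-- ===== SOURCE A (Python) =====
-- from typing import Any, Dict, List, Optional, Tuple
--
-- def ordered_contexts(
--     contexts: List[Optional[str]],
--     preferred_context_order: List[Optional[str]],
-- ) -> List[Optional[str]]:
--     preferred = [
--         None,
--         "Workspace",
--         "Editor && mode == full",
--         "Terminal",
--         "ProjectPanel && not_editing",
--         "menu",
--     ]
--     ordered: List[Optional[str]] = []
--     for context in preferred_context_order + preferred:
--         if context in contexts and context not in ordered: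
--             ordered.append(context)
--     for context in sorted(c for c in contexts if c is not None):
--         if context not in ordered:
--             ordered.append(context)
--     return ordered
-- ===== SOURCE B (Python) =====
-- def ordered_contexts(contexts, preferred_context_order):
--     preferred = [
--         None,
--         "Workspace",
--         "Editor && mode == full",
--         "Terminal",
--         "ProjectPanel && not_editing",
--         "menu",
--     ]
--     # priority list: first occurrences of preferred_context_order + preferred
--     prio = list(dict.fromkeys(preferred_context_order + preferred))
--
--     def key(c):
--         if c in prio:
--             return (prio.index(c), "")
--         return (len(prio), c)
--
--     # one stable sort over the distinct contexts: priority items by their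
--     # priority index, everything else (never None) alphabetically after them
--     return sorted(dict.fromkeys(contexts), key=key)
-- ===== Notes on version B (the rewrite author's own statement) =====
-- stated objective: simpler
-- what changed: Replaces A's two membership-checking append loops (priority scan, then sorted-remainder scan with list 'not in' tests) by one stable sort of the distinct contexts (dict.fromkeys) under a (priority-index, name) key.
import Mathlib
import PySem

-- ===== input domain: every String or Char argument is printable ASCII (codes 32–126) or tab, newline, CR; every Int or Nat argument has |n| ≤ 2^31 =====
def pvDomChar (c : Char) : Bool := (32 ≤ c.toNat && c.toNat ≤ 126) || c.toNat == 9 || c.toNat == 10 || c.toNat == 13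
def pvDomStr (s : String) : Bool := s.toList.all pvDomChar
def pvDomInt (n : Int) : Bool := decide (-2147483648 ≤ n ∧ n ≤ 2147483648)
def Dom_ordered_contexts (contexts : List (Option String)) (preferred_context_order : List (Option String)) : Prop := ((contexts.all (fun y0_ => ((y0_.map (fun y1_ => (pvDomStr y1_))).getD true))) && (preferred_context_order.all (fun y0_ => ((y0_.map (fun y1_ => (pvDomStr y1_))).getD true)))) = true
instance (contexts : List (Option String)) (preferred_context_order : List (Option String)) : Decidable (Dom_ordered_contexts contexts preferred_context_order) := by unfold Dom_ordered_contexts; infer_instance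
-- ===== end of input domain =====

-- B replaces A's two appending loops by one stable sort of the distinct contexts
-- under a (priority-index, name) key; objective: simpler.

-- ===== PORT A =====
-- the `preferred` literal from the Python source (identical in A and B)
def pvPreferred : List (Option String) :=
  [none, some "Workspace", some "Editor && mode == full", some "Terminal",
   some "ProjectPanel && not_editing", some "menu"]

def ordered_contexts (contexts : List (Option String)) (preferred_context_order : List (Option String)) : List (Option String) :=
  -- first loop: for context in preferred_context_order + preferred
  let ordered1 := (preferred_context_order ++ pvPreferred).foldl
    (fun ordered context =>
      if context ∈ contexts ∧ context ∉ ordered then ordered ++ [context] else ordered) []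
  -- second loop: for context in sorted(c for c in contexts if c is not None)
  (PySem.List.sorted (contexts.filterMap id) (fun s => s) false).foldl
    (fun ordered context =>
      if (some context) ∉ ordered then ordered ++ [some context] else ordered) ordered1

-- ===== PORT B =====
def ordered_contexts_alt (contexts : List (Option String)) (preferred_context_order : List (Option String)) : List (Option String) :=
  let prio := PySem.List.dedup (preferred_context_order ++ pvPreferred)
  PySem.List.sorted (PySem.List.dedup contexts)
    (fun c =>
      -- key(c) = (prio.index(c), "") if c in prio else (len(prio), c); the else
      -- branch only sees strings (None ∈ prio), so `c.getD ""` is Python's `c`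
      match PySem.List.index? prio c with
      | some i => (toLex (i, "") : ℕ ×ₗ String)
      | none => (toLex (prio.length, c.getD "") : ℕ ×ₗ String)) false

-- ===== PRECONDITION & SPEC =====
def Spec_ordered_contexts (contexts : List (Option String)) (preferred_context_order : List (Option String)) (out : List (Option String)) : Prop := out = ordered_contexts_alt contexts preferred_context_order
instance (contexts : List (Option String)) (preferred_context_order : List (Option String)) (out : List (Option String)) : Decidable (Spec_ordered_contexts contexts preferred_context_order out) := by unfold Spec_ordered_contexts; infer_instance

-- ===== CLAIM (what is proved, stated in full; the proofs are below) =====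
def Claim_equal_ordered_contexts : Prop := ∀ (contexts : List (Option String)) (preferred_context_order : List (Option String)), Dom_ordered_contexts contexts preferred_context_order → Spec_ordered_contexts contexts preferred_context_order (ordered_contexts contexts preferred_context_order)

-- ===== LEMMAS AND PROOFS =====

-- structural first-occurrence dedup, the proof-side normal form of both loops
def pvDD {α : Type} [DecidableEq α] : List α → List α
  | [] => []
  | c :: t => c :: (pvDD t).filter (fun x => decide (x ≠ c))

theorem pvDD_mem {α : Type} [DecidableEq α] (l : List α) (x : α) : x ∈ pvDD l ↔ x ∈ l := by
  induction l with
  | nil => simp [pvDD]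
  | cons c t ih =>
    simp only [pvDD, List.mem_cons, List.mem_filter, ih, decide_eq_true_eq]
    constructor
    · rintro (h | ⟨h, _⟩) <;> simp [h]
    · rintro (h | h)
      · exact Or.inl h
      · by_cases hx : x = c
        · exact Or.inl hx
        · exact Or.inr ⟨h, hx⟩

theorem pvDD_sublist {α : Type} [DecidableEq α] (l : List α) : (pvDD l).Sublist l := by
  induction l with
  | nil => simp [pvDD]
  | cons c t ih =>
    exact List.Sublist.cons₂ c (List.filter_sublist.trans ih)

theorem pvDD_nodup {α : Type} [DecidableEq α] (l : List α) : (pvDD l).Nodup := by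
  induction l with
  | nil => simp [pvDD]
  | cons c t ih =>
    refine List.Nodup.cons ?_ (ih.filter _)
    intro hmem
    have := (List.mem_filter.mp hmem).2
    simp at this

theorem pvDD_filter {α : Type} [DecidableEq α] (q : α → Bool) (l : List α) :
    pvDD (l.filter q) = (pvDD l).filter q := by
  induction l with
  | nil => simp [pvDD]
  | cons c t ih =>
    by_cases hq : q c
    · simp only [List.filter_cons, hq, if_pos, pvDD, ih, List.filter_comm]
    · simp only [List.filter_cons, hq, Bool.false_eq_true, if_neg, not_false_iff, pvDD, ih]
      rw [List.filter_comm]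
      symm
      apply List.filter_eq_self.mpr
      intro x hx
      have hqx := (List.mem_filter.mp hx).2
      simp only [decide_eq_true_eq]
      rintro rfl
      rw [hqx] at hq
      exact hq rfl

-- the core loop shape: "if c not in acc: acc.append(c)"
theorem pvFoldl_add (l acc : List (Option String)) :
    l.foldl (fun a c => if c ∈ a then a else a ++ [c]) acc
      = acc ++ (pvDD l).filter (fun x => decide (x ∉ acc)) := by
  induction l generalizing acc with
  | nil => simp [pvDD]
  | cons c t ih =>
    simp only [List.foldl_cons]
    by_cases hc : c ∈ acc
    · rw [if_pos hc, ih]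
      simp only [pvDD, List.filter_cons]
      have : (decide (c ∉ acc)) = false := by simp [hc]
      rw [this, if_neg (by simp)]
      congr 1
      rw [List.filter_filter]
      apply List.filter_congr
      intro x _
      by_cases hxc : x = c
      · subst hxc; simp [hc]
      · simp [hxc]
    · rw [if_neg hc, ih]
      simp only [pvDD, List.filter_cons]
      have : (decide (c ∉ acc)) = true := by simp [hc]
      rw [this, if_pos rfl]
      simp only [List.append_assoc, List.singleton_append]
      congr 2
      rw [List.filter_filter]
      apply List.filter_congr
      intro x _
      by_cases h1 : x ∈ acc <;> by_cases h2 : x = c <;> simp [h1, h2]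

theorem pvDedup_eq_pvDD (l : List (Option String)) : PySem.List.dedup l = pvDD l := by
  have h : ∀ (l acc : List (Option String)), l.foldl PySem.Set.add acc
      = acc ++ (pvDD l).filter (fun x => decide (x ∉ acc)) := by
    intro l acc
    rw [← pvFoldl_add l acc]
    apply PySem.List.foldl_congr_mem
    intro a x _
    simp only [PySem.Set.add, PySem.Set.contains]
    by_cases hx : x ∈ a
    · rw [if_pos (by simpa using hx), if_pos hx]
    · rw [if_neg (by simpa using hx), if_neg hx]
  have := h l []
  simpa [PySem.List.dedup, PySem.Set.ofList_eq_foldl, PySem.Set.empty] using this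

-- loop A1 in closed form: the dedup of the priority list, filtered to contexts
theorem pvLoopA1 (contexts P : List (Option String)) :
    P.foldl (fun ordered context =>
        if context ∈ contexts ∧ context ∉ ordered then ordered ++ [context] else ordered) []
      = (pvDD P).filter (fun x => decide (x ∈ contexts)) := by
  have h1 : P.foldl (fun ordered context =>
        if context ∈ contexts ∧ context ∉ ordered then ordered ++ [context] else ordered) []
      = P.foldl (fun ordered context =>
        if context ∈ contexts then (if context ∈ ordered then ordered else ordered ++ [context])
        else ordered) [] := by
    apply PySem.List.foldl_congr_mem
    intro a x _
    by_cases h1 : x ∈ contexts <;> by_cases h2 : x ∈ a <;>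
      simp [h1, h2]
  rw [h1, PySem.List.foldl_ite_eq_foldl_filter]
  refine (pvFoldl_add _ _).trans ?_
  rw [pvDD_filter]
  simp

-- index? of the i-th element of a Nodup list
theorem pvIndex?_getElem (l : List (Option String)) (h : l.Nodup)
    (i : ℕ) (hi : i < l.length) : PySem.List.index? l l[i] = some i := by
  rw [PySem.List.index?_eq_idxOf?, List.idxOf?_eq_some_iff]
  refine ⟨hi, rfl, ?_⟩
  intro j hj hne
  have := (List.Nodup.getElem_inj_iff h).mp hne
  omega

theorem pvIndex?_lt_length (l : List (Option String)) (x : Option String) (i : ℕ)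
    (h : PySem.List.index? l x = some i) : i < l.length := by
  rw [PySem.List.index?_eq_idxOf?] at h
  obtain ⟨hi, -, -⟩ := List.idxOf?_eq_some_iff.mp h
  exact hi

theorem pvIndex?_of_mem (l : List (Option String)) (x : Option String) (h : x ∈ l) :
    ∃ i, PySem.List.index? l x = some i ∧ i < l.length := by
  rw [PySem.List.index?_eq_idxOf?]
  obtain ⟨o, ho⟩ := Option.isSome_iff_exists.mp (List.isSome_idxOf?.mpr h)
  exact ⟨o, ho, pvIndex?_lt_length l x o (by rw [PySem.List.index?_eq_idxOf?]; exact ho)⟩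

theorem pvIndex?_of_not_mem (l : List (Option String)) (x : Option String) (h : x ∉ l) :
    PySem.List.index? l x = none := by
  rw [PySem.List.index?_eq_idxOf?]
  exact List.idxOf?_eq_none_iff.mpr h

-- ===== the main theorem =====
theorem ordered_contexts_eq (contexts preferred_context_order : List (Option String)) :
    ordered_contexts contexts preferred_context_order
      = ordered_contexts_alt contexts preferred_context_order := by
  classical
  set P := preferred_context_order ++ pvPreferred with hP
  set prio := PySem.List.dedup P with hprio
  have hdd : prio = pvDD P := pvDedup_eq_pvDD P
  set key : Option String → ℕ ×ₗ String := fun c =>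
      match PySem.List.index? prio c with
      | some i => (toLex (i, "") : ℕ ×ₗ String)
      | none => (toLex (prio.length, c.getD "") : ℕ ×ₗ String) with hkey
  -- closed form of A
  set SS := PySem.List.sorted (contexts.filterMap id) (fun s => s) false with hSS
  set ord1 := prio.filter (fun x => decide (x ∈ contexts)) with hord1
  set tail := (pvDD (SS.map some)).filter (fun x => decide (x ∉ ord1)) with htail
  have hA : ordered_contexts contexts preferred_context_order = ord1 ++ tail := by
    unfold ordered_contexts
    rw [← hP, pvLoopA1, ← hdd, ← hord1, ← hSS]
    have step : SS.foldl (fun ordered context =>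
          if (some context) ∉ ordered then ordered ++ [some context] else ordered) ord1
        = (SS.map some).foldl (fun ordered context =>
          if context ∈ ordered then ordered else ordered ++ [context]) ord1 := by
      rw [List.foldl_map]
      apply PySem.List.foldl_congr_mem
      intro a x _
      by_cases h : some x ∈ a <;> simp [h]
    rw [step]
    refine (pvFoldl_add _ _).trans ?_
    rw [← htail]
  -- B is a sort of the distinct contexts under `key`
  have hB : ordered_contexts_alt contexts preferred_context_order
      = PySem.List.sorted (PySem.List.dedup contexts) key false := rfl
  -- basic membership facts
  have hord1_mem : ∀ x, x ∈ ord1 ↔ x ∈ prio ∧ x ∈ contexts := by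
    intro x; simp [hord1, List.mem_filter]
  have htail_mem : ∀ x, x ∈ tail → x ∈ SS.map some ∧ x ∉ ord1 := by
    intro x hx
    have := List.mem_filter.mp hx
    exact ⟨(pvDD_mem _ _).mp this.1, by simpa using this.2⟩
  have hmemSS : ∀ x, x ∈ SS.map some ↔ x ≠ none ∧ x ∈ contexts := by
    intro x
    constructor
    · rintro hx
      obtain ⟨s, hs, rfl⟩ := List.mem_map.mp hx
      rw [hSS, PySem.List.mem_sorted] at hs
      obtain ⟨a, ha, hfa⟩ := List.mem_filterMap.mp hs
      simp only [id] at hfa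
      subst hfa
      exact ⟨by simp, ha⟩
    · rintro ⟨hne, hx⟩
      obtain ⟨s, rfl⟩ := Option.ne_none_iff_exists'.mp hne
      refine List.mem_map.mpr ⟨s, ?_, rfl⟩
      rw [hSS, PySem.List.mem_sorted]
      exact List.mem_filterMap.mpr ⟨some s, hx, rfl⟩
  have hnone_prio : (none : Option String) ∈ prio := by
    rw [hdd, pvDD_mem, hP]
    simp [pvPreferred]
  -- key facts on the two blocks
  have hkey_ord1 : ∀ x ∈ ord1, ∃ i, PySem.List.index? prio x = some i ∧ i < prio.length := by
    intro x hx
    exact pvIndex?_of_mem prio x ((hord1_mem x).mp hx).1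
  have hkey_tail : ∀ x ∈ tail, PySem.List.index? prio x = none ∧ x ≠ none := by
    intro x hx
    obtain ⟨hxM, hxo⟩ := htail_mem x hx
    obtain ⟨hne, hxc⟩ := (hmemSS x).mp hxM
    have hnp : x ∉ prio := by
      intro hp
      exact hxo ((hord1_mem x).mpr ⟨hp, hxc⟩)
    exact ⟨pvIndex?_of_not_mem prio x hnp, hne⟩
  -- Pairwise of the key along A's output
  have hpair : (ord1 ++ tail).Pairwise (fun a b => key a < key b) := by
    rw [List.pairwise_append]
    refine ⟨?_, ?_, ?_⟩
    · -- within ord1: strictly increasing priority index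
      have hprio_pair : prio.Pairwise (fun a b => key a < key b) := by
        rw [List.pairwise_iff_getElem]
        intro i j hi hj hij
        have h1 := pvIndex?_getElem prio (hdd ▸ pvDD_nodup P) i hi
        have h2 := pvIndex?_getElem prio (hdd ▸ pvDD_nodup P) j hj
        simp only [hkey, h1, h2]
        exact Prod.Lex.lt_iff.mpr (Or.inl hij)
      exact hprio_pair.sublist (List.filter_sublist)
    · -- within tail: all outside prio, strictly increasing strings
      have hle : tail.Pairwise (fun a b => a.getD "" ≤ b.getD "") := by
        have h1 : SS.Pairwise (fun a b : String => a ≤ b) :=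
          PySem.List.sorted_pairwise (contexts.filterMap id) (fun s => s)
        have h2 : (SS.map some).Pairwise
            (fun a b : Option String => a.getD "" ≤ b.getD "") := by
          rw [List.pairwise_map]
          simpa using h1
        exact List.Pairwise.sublist (List.filter_sublist.trans (pvDD_sublist _)) h2
      have hne : tail.Pairwise (fun a b => a ≠ b) :=
        List.Nodup.filter _ (pvDD_nodup _)
      refine (hle.and hne).imp_of_mem ?_
      intro a b ha hb hab
      obtain ⟨hia, hna⟩ := hkey_tail a ha
      obtain ⟨hib, hnb⟩ := hkey_tail b hb
      obtain ⟨sa, rfl⟩ := Option.ne_none_iff_exists'.mp hna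
      obtain ⟨sb, rfl⟩ := Option.ne_none_iff_exists'.mp hnb
      simp only [hkey, hia, hib]
      refine Prod.Lex.lt_iff.mpr (Or.inr ⟨rfl, ?_⟩)
      have h1 : sa ≤ sb := by simpa using hab.1
      have h2 : sa ≠ sb := by
        intro h; exact hab.2 (by rw [h])
      exact lt_of_le_of_ne h1 h2
    · -- across: any priority index is below prio.length
      intro a ha b hb
      obtain ⟨i, hia, hilt⟩ := hkey_ord1 a ha
      obtain ⟨hib, -⟩ := hkey_tail b hb
      simp only [hkey, hia, hib]
      exact Prod.Lex.lt_iff.mpr (Or.inl hilt)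
  -- Permutation with the distinct contexts
  have hnodup : (ord1 ++ tail).Nodup := by
    refine List.Nodup.append ?_ ?_ ?_
    · exact hord1 ▸ List.Nodup.filter _ (hdd ▸ pvDD_nodup P)
    · exact List.Nodup.filter _ (pvDD_nodup _)
    · intro x hx hx2
      exact (htail_mem x hx2).2 hx
  have hperm : (ord1 ++ tail).Perm (PySem.List.dedup contexts) := by
    rw [pvDedup_eq_pvDD]
    rw [List.perm_ext_iff_of_nodup hnodup (pvDD_nodup contexts)]
    intro x
    rw [pvDD_mem, List.mem_append]
    constructor
    · rintro (hx | hx)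
      · exact ((hord1_mem x).mp hx).2
      · exact ((hmemSS x).mp (htail_mem x hx).1).2
    · intro hx
      by_cases ho : x ∈ ord1
      · exact Or.inl ho
      · refine Or.inr ?_
        have hxne : x ≠ none := by
          rintro rfl
          exact ho ((hord1_mem none).mpr ⟨hnone_prio, hx⟩)
        refine List.mem_filter.mpr ⟨(pvDD_mem _ _).mpr ((hmemSS x).mpr ⟨hxne, hx⟩), by simpa⟩
  rw [hA, hB]
  exact (PySem.List.sorted_eq_of_perm_of_pairwise_lt _ _ key hperm hpair).symm

-- ===== VERDICT (by name: the statement is the Claim_ definition above) =====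
theorem ordered_contexts_spec : Claim_equal_ordered_contexts := by
  intro contexts pco _
  unfold Spec_ordered_contexts
  exact ordered_contexts_eq contexts pco
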